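-- pv_equiv track=rewrite | github.com/hellobuffet/homeworks | h4/sales.py | max_salesman
-- ===== SOURCE A (Python) =====
-- def everyone_sales(price, amount, salesMan):
--     total_sales = 0
--     total_sales_list = []
--     for i in range(len(salesMan)):
--         for j in range(len(price)):
--             total_sales = total_sales + (price[j] * amount[i][j])
--         total_sales_list.append([salesMan[i], total_sales])
--         total_sales = 0
--     return total_sales_list
--
-- def max_salesman(price, amount, salesMan):
--     total_sales_list = everyone_sales(price, amount, salesMan)
--     max_price = total_sales_list[0][1]
--     max_salesman = ''
--     for i in range(len(total_sales_list)):
--         if total_sales_list[i][1] >= max_price: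
--             max_price = total_sales_list[i][1]
--             max_salesman = total_sales_list[i][0]
--     return max_salesman
-- ===== SOURCE B (Python) =====
-- def max_salesman(price, amount, salesMan):
--     best_total = None
--     best_name = ''
--     for i, name in enumerate(salesMan):
--         total = sum(p * amount[i][j] for j, p in enumerate(price))
--         if best_total is None or total >= best_total:
--             best_total = total
--             best_name = name
--     return best_name
-- ===== Notes on version B (the rewrite author's own statement) =====
-- stated objective: simpler
-- what changed: One pass that keeps a running best total/name (last-wins on >=) instead of building an intermediate [name,total] list and rescanning it with a second loop.
import Mathlib
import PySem

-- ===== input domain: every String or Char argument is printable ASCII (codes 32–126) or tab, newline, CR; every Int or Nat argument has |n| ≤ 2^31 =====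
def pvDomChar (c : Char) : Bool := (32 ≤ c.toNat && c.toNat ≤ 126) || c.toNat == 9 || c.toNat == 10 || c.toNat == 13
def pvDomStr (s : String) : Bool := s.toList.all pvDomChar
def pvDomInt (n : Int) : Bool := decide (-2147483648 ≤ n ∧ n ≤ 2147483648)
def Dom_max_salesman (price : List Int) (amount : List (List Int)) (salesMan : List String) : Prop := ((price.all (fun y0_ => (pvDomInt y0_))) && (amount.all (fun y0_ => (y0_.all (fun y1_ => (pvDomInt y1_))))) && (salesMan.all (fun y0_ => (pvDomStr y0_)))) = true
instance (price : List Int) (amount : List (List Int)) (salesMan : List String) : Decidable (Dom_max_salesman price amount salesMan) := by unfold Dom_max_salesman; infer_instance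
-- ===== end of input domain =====

-- B replaces A's build-a-totals-list-then-rescan with a single pass keeping a running best total/name (same last-wins tie rule); objective: simpler.


-- ===== PORT A =====
-- helper 'everyone_sales' of A: builds [name, total] pairs; total_sales resets to 0 at each outer iteration
def everyone_sales (price : List Int) (amount : List (List Int)) (salesMan : List String) : List (String × Int) :=
  (PySem.List.pyRange 0 (salesMan.length : Int) 1).foldl
    (fun acc i =>
      acc ++ [(PySem.List.pyGetD salesMan i "",
        (PySem.List.pyRange 0 (price.length : Int) 1).foldl
          (fun t j => t + PySem.List.pyGetD price j 0 * PySem.List.pyGetD (PySem.List.pyGetD amount i []) j 0) 0)])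
    []

def max_salesman (price : List Int) (amount : List (List Int)) (salesMan : List String) : String :=
  let tsl := everyone_sales price amount salesMan
  let maxPrice0 := (PySem.List.pyGetD tsl 0 ("", 0)).2
  ((PySem.List.pyRange 0 (tsl.length : Int) 1).foldl
    (fun (st : Int × String) i =>
      let e := PySem.List.pyGetD tsl i ("", 0)
      if e.2 ≥ st.1 then (e.2, e.1) else st)
    (maxPrice0, "")).2

-- ===== PORT B =====
def max_salesman_alt (price : List Int) (amount : List (List Int)) (salesMan : List String) : String :=
  ((PySem.List.enumerate salesMan 0).foldl
    (fun (st : Option Int × String) p =>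
      let total := (PySem.List.enumerate price 0).foldl
        (fun t q => t + q.2 * PySem.List.pyGetD (PySem.List.pyGetD amount p.1 []) q.1 0) 0
      match st.1 with
      | none => (some total, p.2)
      | some bt => if total ≥ bt then (some total, p.2) else st)
    (none, "")).2

-- ===== PRECONDITION & SPEC =====
-- Pre_ excludes exactly the inputs where A raises: empty salesMan (IndexError on total_sales_list[0])
-- and, when price is nonempty, indexing amount[i][j] out of range for some visited i, j.
def Pre_max_salesman (price : List Int) (amount : List (List Int)) (salesMan : List String) : Prop :=
  salesMan ≠ [] ∧ (price ≠ [] → salesMan.length ≤ amount.length ∧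
    ∀ row ∈ amount.take salesMan.length, price.length ≤ row.length)
instance (price : List Int) (amount : List (List Int)) (salesMan : List String) : Decidable (Pre_max_salesman price amount salesMan) := by unfold Pre_max_salesman; infer_instance

def pvWitness_max_salesman : List Int × List (List Int) × List String := ([2, 1], [[3, 0], [4, 5]], ["a", "b"])

def Spec_max_salesman (price : List Int) (amount : List (List Int)) (salesMan : List String) (out : String) : Prop := out = max_salesman_alt price amount salesMan
instance (price : List Int) (amount : List (List Int)) (salesMan : List String) (out : String) : Decidable (Spec_max_salesman price amount salesMan out) := by unfold Spec_max_salesman; infer_instance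

-- ===== CLAIM (what is proved, stated in full; the proofs are below) =====
def Claim_equal_max_salesman : Prop := ∀ (price : List Int) (amount : List (List Int)) (salesMan : List String), Dom_max_salesman price amount salesMan → Pre_max_salesman price amount salesMan → Spec_max_salesman price amount salesMan (max_salesman price amount salesMan)

-- ===== LEMMAS AND PROOFS =====

-- step functions of the two final scans
def stepA (st : Int × String) (e : String × Int) : Int × String :=
  if e.2 ≥ st.1 then (e.2, e.1) else st

def stepB (st : Option Int × String) (e : String × Int) : Option Int × String :=
  match st.1 with
  | none => (some e.2, e.1)
  | some bt => if e.2 ≥ bt then (some e.2, e.1) else st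

-- the inner totals of A (index loop) and B (enumerate loop) agree
theorem inner_eq (price row : List Int) :
    (PySem.List.pyRange 0 (price.length : Int) 1).foldl
        (fun t j => t + PySem.List.pyGetD price j 0 * PySem.List.pyGetD row j 0) 0
      = (PySem.List.enumerate price 0).foldl
        (fun t q => t + q.2 * PySem.List.pyGetD row q.1 0) 0 := by
  rw [PySem.List.enumerate_eq_map_pyRange (d := 0), List.foldl_map]
  simp

def total (price : List Int) (amount : List (List Int)) (i : Int) : Int :=
  (PySem.List.pyRange 0 (price.length : Int) 1).foldl
    (fun t j => t + PySem.List.pyGetD price j 0 * PySem.List.pyGetD (PySem.List.pyGetD amount i []) j 0) 0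

theorem everyone_sales_eq (price : List Int) (amount : List (List Int)) (salesMan : List String) :
    everyone_sales price amount salesMan
      = (PySem.List.pyRange 0 (salesMan.length : Int) 1).map
          (fun i => (PySem.List.pyGetD salesMan i "", total price amount i)) := by
  unfold everyone_sales total
  rw [PySem.List.foldl_append_singleton_eq_map]
  simp

-- after the first element the two scans run in lockstep
theorem scan_inv (l : List (String × Int)) : ∀ (mp : Int) (nm : String),
    l.foldl stepB (some mp, nm)
      = (some (l.foldl stepA (mp, nm)).1, (l.foldl stepA (mp, nm)).2) := by
  induction l with
  | nil => intro mp nm; rfl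
  | cons e t ih =>
    intro mp nm
    simp only [List.foldl_cons, stepA, stepB]
    by_cases h : e.2 ≥ mp
    · simp [h, ih]
    · simp [h, ih]

theorem scan_eq (e0 : String × Int) (l : List (String × Int)) :
    ((e0 :: l).foldl stepA (e0.2, "")).2 = ((e0 :: l).foldl stepB (none, "")).2 := by
  simp only [List.foldl_cons]
  have hA : stepA (e0.2, "") e0 = (e0.2, e0.1) := by simp [stepA]
  have hB : stepB (none, "") e0 = (some e0.2, e0.1) := rfl
  rw [hA, hB, scan_inv]

-- ===== VERDICT (by name: the statement is the Claim_ definition above) =====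
theorem max_salesman_spec : Claim_equal_max_salesman := by
  intro price amount salesMan _hDom hPre
  unfold Spec_max_salesman
  obtain ⟨hne, -⟩ := hPre
  -- rewrite A to a scan over the totals list
  show max_salesman price amount salesMan = _
  unfold max_salesman max_salesman_alt
  rw [everyone_sales_eq]
  set L := (PySem.List.pyRange 0 (salesMan.length : Int) 1).map
      (fun i => (PySem.List.pyGetD salesMan i "", total price amount i)) with hL
  have hAfold :
      ((PySem.List.pyRange 0 (L.length : Int) 1).foldl
        (fun (st : Int × String) i =>
          let e := PySem.List.pyGetD L i ("", 0)
          if e.2 ≥ st.1 then (e.2, e.1) else st)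
        ((PySem.List.pyGetD L 0 ("", 0)).2, "")).2
      = (L.foldl stepA ((PySem.List.pyGetD L 0 ("", 0)).2, "")).2 := by
    have hfun : (fun (st : Int × String) i =>
        let e := PySem.List.pyGetD L i ("", 0)
        if e.2 ≥ st.1 then (e.2, e.1) else st)
        = (fun (st : Int × String) i => stepA st (PySem.List.pyGetD L i ("", 0))) := rfl
    rw [hfun, PySem.List.foldl_pyRange_zero_pyGetD' L ("", 0) stepA]
  -- rewrite B to a scan over the same list
  have hBfold :
      ((PySem.List.enumerate salesMan 0).foldl
        (fun (st : Option Int × String) p =>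
          let t := (PySem.List.enumerate price 0).foldl
            (fun t q => t + q.2 * PySem.List.pyGetD (PySem.List.pyGetD amount p.1 []) q.1 0) 0
          match st.1 with
          | none => (some t, p.2)
          | some bt => if t ≥ bt then (some t, p.2) else st)
        (none, "")).2
      = (L.foldl stepB (none, "")).2 := by
    rw [PySem.List.enumerate_eq_map_pyRange (d := ""), List.foldl_map, hL, List.foldl_map]
    congr 1
    apply PySem.List.foldl_congr_mem
    intro st i _
    simp only [stepB, ← inner_eq]
    rfl
  rw [hAfold, hBfold]
  -- L is nonempty since salesMan is
  have hlen : L.length = salesMan.length := by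
    simp [hL, PySem.List.length_pyRange_one]
  cases hE : L with
  | nil =>
    exfalso
    have : salesMan.length = 0 := by rw [← hlen, hE]; rfl
    exact hne (List.eq_nil_of_length_eq_zero this)
  | cons e0 t =>
    rw [PySem.List.pyGetD_zero_cons]
    exact scan_eq e0 t
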